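/- GENERATED by farm/worked/mk_tree_copies.py from farm/worked/arena_temp_restore/Proof.lean (a worked proof of the farm's unit `arena_temp_restore`,
   accepted by the verdict) — do not edit. -/
/-
  UNIT `arena_temp_restore`, PROVED (farm worker of freeze-5, attempt 1: it returned the CONTRACT-PRE problem "`*f` may lie inside the
  released range" together with this complete proof under the missing clause; freeze-6 added the clause to `arena_temp_restore.spec.pre`).

      check_fails_inside_w     why the clause is needed: with `f + 135` in `[B + T, B + p)` the check at 10916dH fails
      cut_facts_w              `T ≤ p ≤ L`, `p % 8 = 0` from the cut-point clause of the precondition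
      calls_of_apart_w         THE WHOLE UNIT, walked to the `ret` (`hfree` = the last clause of the precondition)
-/
import Asan.CheckWalk
import Vorbis.Spec.Units.arena_temp_restore

open X86 X86.User Asan Vorbis

set_option maxRecDepth 4000
set_option maxHeartbeats 4000000

namespace Vorbis.Spec.Worked.arena_temp_restore
open Vorbis.Spec.arena_temp_restore (Statement)

/-- **The check after the poisoning is tight**: for a memory whose shadow is that of `poisonMem mem a n` (the memory after
`arena_poison(a, n)` and any number of stores outside the shadow), a 4-byte check of an address whose last byte lies in `[a, a + n)`
does not hold. With `a = B + T`, `n = p − T`, `x = f + 132`: the goal `check_10916d` of this unit is false for such an `f`. -/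
theorem check_fails_inside_w {mem mem' : Mem} {a n : Nat} (h8 : a % 8 = 0) (hhi : a + (n + 7) / 8 * 8 ≤ 0xC00000)
    (hun : ShadowUntouched (poisonMem mem a n) mem') (x : Word) (h1 : a ≤ x.toNat + 3) (h2 : x.toNat + 3 < a + n) :
    ¬ AccSmall 4 mem' x := by
  intro hacc
  have hlast := hacc.2.acc.last
  unfold ByteOK ByteOKv shadowByte at hlast
  have hg : (x.toNat + 4 - 1) / 8 < 0x200000 := by omega
  rw [shadowOf_eqOn hun _ hg] at hlast
  rw [shadowOf_poisonMem_in mem a n _ h8 hhi (by omega) (by omega)] at hlast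
  omega

/-- **The cut point of the precondition, as arithmetic**: `T ≤ p ≤ L` and `p` is a multiple of 8 (`p` is where the chain of the
released blocks ends, and the chain of the kept ones, which ends at `L`, begins). -/
theorem cut_facts_w {A : Arena} {others : List Obj} {mem : Mem} {f : Nat} (hA : ArenaOK A others mem f)
    {dead keep : List (Nat × Nat)} {p : Nat} (ht : A.temps = dead ++ keep) (hd : TempChain A.T dead p) :
    A.T ≤ p ∧ p ≤ A.L ∧ p % 8 = 0 := by
  have h1 := hA.AR1
  have h4 := hA.AR4
  rw [ht] at h4
  obtain ⟨p', hd', hk⟩ := TempChain.append_iff.mp h4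
  have ep : p = p' := hd.end_unique hd'
  subst ep
  have hle1 := hd.le
  have hle2 := hk.le
  have hal := (hk.aligned h1.2.2.1).1
  exact ⟨hle1, hle2, hal⟩

/-- **`arena_temp_restore` satisfies its contract IF `*f` DOES NOT MEET THE RELEASED RANGE** `[B + T, B + p)` (`hfree`: the clause
that `arena_temp_restore.spec.pre` lacks). The hypotheses are those of `Statement`, opened; the conclusion is the body of its `Calls`.
Straight-line code: four pushes, check load8 `f + 112`, check load4 `f + 132`, `arena_poison(B + T, p − T)`, check store4 `f + 132`
in the NEW shadow (`ObjLive.drop` needs `hfree`), the store, four pops, `ret`. The arm `alloc_buffer = 0` is dead (AR1). -/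
theorem calls_of_apart_w (Lay : Layout) (hLay : Lay.hi = 0x1000000) (μ : Microarch) (hμ : UserX.MicroOK μ) (u₀ : State)
    (hcode : HasCodeNat Lay u₀ Vorbis.L.arena_temp_restore.entry Vorbis.Code.code_arena_temp_restore.nat Vorbis.L.arena_temp_restore.size)
    (hload8 : Asan.SmallCheck Lay μ Vorbis.WayInv (Vorbis.CodeOK u₀) [.rax, .rcx, .rdx] 8 Vorbis.L.__asan_load8_noabort.entry)
    (hload4 : Asan.SmallCheck Lay μ Vorbis.WayInv (Vorbis.CodeOK u₀) [.rax, .rcx, .rdx] 4 Vorbis.L.__asan_load4_noabort.entry)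
    (hpoison : Calls Lay μ Vorbis.WayInv (Vorbis.conv u₀) Vorbis.L.arena_poison.entry Asan.arenaPoisonSpec)
    (hstore4 : Asan.SmallCheck Lay μ Vorbis.WayInv (Vorbis.CodeOK u₀) [.rax, .rcx, .rdx] 4 Vorbis.L.__asan_store4_noabort.entry)
    (others : List Obj) (frames : List (Nat × FrameLayout)) (A : Arena) (dead keep : List (Nat × Nat))
    (u : State) (ret : Word)
    (he : AtEntry (Vorbis.conv u₀) Vorbis.L.arena_temp_restore.entry (Vorbis.Spec.arena_temp_restore.spec others frames A dead keep).frame ret u)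
    (hpre : (Vorbis.Spec.arena_temp_restore.spec others frames A dead keep).pre u)
    (hfree : (u.reg .rdi).toNat + 1808 ≤ A.B + A.T ∨ A.B + (u.reg .rsi).toNat % 2 ^ 32 ≤ (u.reg .rdi).toNat) :
    ReachVia Lay μ Vorbis.WayInv u (Returned (Vorbis.conv u₀) (Vorbis.Spec.arena_temp_restore.spec others frames A dead keep) u ret) := by
  v_entry he
  obtain ⟨hpre, htemps, hchain, _⟩ := hpre
  -- where `*f` and the arena are: arithmetic facts for `u_omega`
  have hsh := hpre.shadow
  have hsp := hsh.rsp
  have hA := hpre.arena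
  have hb := hA.bounds
  have h1 := hA.AR1
  have h1x := hA.AR1x
  have h2 := hA.AR2
  have hwhere := hpre.obj.where_ hsh.inv hsh.offText (by omega)
  -- the two loads of `*f`, as rewrite rules of the walk: `alloc_buffer` = B, `temp_offset` = T
  have r1 := hpre.read_buffer
  have r2 := hpre.read_temp
  -- the argument `p` (esi, read unsigned): `T ≤ p ≤ L`, a multiple of 8; the two `movsxd` are exact
  obtain ⟨hp1, hp2, hp3⟩ := cut_facts_w hA htemps hchain
  obtain ⟨p, hp⟩ : ∃ p : Nat, (u.reg .rsi).toNat % 2 ^ 32 = p := ⟨_, rfl⟩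
  rw [hp] at hp1 hp2 hp3 hfree
  have e13 : (Word.ofBV (BitVec.signExtend 64 (Word.part .w32 (u.reg .rsi)))).toNat = p := by
    have hlt : (Word.part .w32 (u.reg .rsi)).toNat < 2 ^ 31 := by
      rw [part32_toNat, hp]
      omega
    rw [toNat_sext32 _ hlt, part32_toNat, hp]
  have eT : (Word.ofBV (BitVec.signExtend 64 (BitVec.ofNat 32 A.T))).toNat = A.T := by
    have e : (BitVec.ofNat 32 A.T).toNat = A.T := by
      rw [BitVec.toNat_ofNat]
      omega
    have hlt : (BitVec.ofNat 32 A.T).toNat < 2 ^ 31 := by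
      rw [e]
      omega
    rw [toNat_sext32 _ hlt, e]
  u_walk hcode [hμ.vendor] span [Vorbis.L.textLo, Vorbis.L.textHi] side (v_side)
  · -- 109133H (C 1011 `if (f->alloc.alloc_buffer)`): check load8 `f + 112`, inside `*f`; only pushes so far
    have hun : ShadowUntouched u.mem s_109133.mem := by v_untouched
    exact hpre.obj.accSmall hsh.inv hun _ 8 (by decide) (by u_omega) (by u_omega)
  · -- 10914bH (C 1012 `f->temp_offset`): check load4 `f + 132`, inside `*f`
    have hun : ShadowUntouched u.mem s_10914b.mem := by v_untouched
    exact hpre.obj.accSmall hsh.inv hun _ 4 (by decide) (by u_omega) (by u_omega)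
  · -- 109161H (C 1012): the call of `arena_poison`: DF and the MXCSR masks at its entry
    v_inv
  · -- its precondition: `B + T` is 8-aligned, in the data space, and every granule up to `B + p` lies below C00000H
    show (s_109161.reg .rdi).toNat % 8 = 0 ∧ 0x100000 ≤ (s_109161.reg .rdi).toNat ∧
      (s_109161.reg .rdi).toNat + ((s_109161.reg .rsi).toNat + 7) / 8 * 8 ≤ 0xC00000
    rw [w_rdi, w_rsi]
    u_omega
  · -- CUT POINT: after the return of `arena_poison` (109166H, C 1013 `f->temp_offset = p`)
    v_after_call w_rsp_109161 w_mem_109161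
    -- its arguments and its footprint as numbers
    have hrdi : (s_109161.reg .rdi).toNat = A.B + A.T := by
      rw [w_rdi_109161]
      u_omega
    have hrsi : (s_109161.reg .rsi).toNat = p - A.T := by
      rw [w_rsi_109161]
      u_omega
    have hw : arenaPoisonSpec.writes s_109161 =
        [⟨0xC00000 + (A.B + A.T) / 8, 0xC00000 + (A.B + p + 7) / 8⟩] := by
      show [shadowSpan (s_109161.reg .rdi).toNat ((s_109161.reg .rdi).toNat + (s_109161.reg .rsi).toNat)] = _
      rw [hrdi, hrsi]
      unfold shadowSpan
      have e : A.B + A.T + (p - A.T) = A.B + p := by omega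
      rw [e]
    rw [hw] at w_same
    -- the return address and the four saved registers, carried over the callee's footprint (shadow bytes only)
    have hs0 : UInt64.ofNat (s_109161r.mem.readLE (u.reg .rsp) 8) = ret := by
      u_frame he_retAddr
    have hs1 : UInt64.ofNat (s_109161r.mem.readLE (u.reg .rsp - 8) 8) = u.reg .r13 := by
      have h0 : (((((u.mem.writeLE (u.reg Reg.rsp - 8) 8 (UInt64.toNat (u.reg Reg.r13))).writeLE (u.reg Reg.rsp - 16) 8
          (UInt64.toNat (u.reg Reg.r12))).writeLE (u.reg Reg.rsp - 24) 8 (UInt64.toNat (u.reg Reg.rbp))).writeLE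
          (u.reg Reg.rsp - 32) 8 (UInt64.toNat (u.reg Reg.rbx))).writeLE (u.reg Reg.rsp - 48) 8 1085798).readLE (u.reg .rsp - 8) 8 = (u.reg .r13).toNat := by
        u_read
      have h1' := Mem.readLE_frame (ν := s_109161r.mem) h0 (by u_eqon) (by u_omega)
      rw [h1']
      exact UInt64.ofNat_toNat
    have hs2 : UInt64.ofNat (s_109161r.mem.readLE (u.reg .rsp - 16) 8) = u.reg .r12 := by
      have h0 : (((((u.mem.writeLE (u.reg Reg.rsp - 8) 8 (UInt64.toNat (u.reg Reg.r13))).writeLE (u.reg Reg.rsp - 16) 8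
          (UInt64.toNat (u.reg Reg.r12))).writeLE (u.reg Reg.rsp - 24) 8 (UInt64.toNat (u.reg Reg.rbp))).writeLE
          (u.reg Reg.rsp - 32) 8 (UInt64.toNat (u.reg Reg.rbx))).writeLE (u.reg Reg.rsp - 48) 8 1085798).readLE (u.reg .rsp - 16) 8 = (u.reg .r12).toNat := by
        u_read
      have h1' := Mem.readLE_frame (ν := s_109161r.mem) h0 (by u_eqon) (by u_omega)
      rw [h1']
      exact UInt64.ofNat_toNat
    have hs3 : UInt64.ofNat (s_109161r.mem.readLE (u.reg .rsp - 24) 8) = u.reg .rbp := by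
      have h0 : (((((u.mem.writeLE (u.reg Reg.rsp - 8) 8 (UInt64.toNat (u.reg Reg.r13))).writeLE (u.reg Reg.rsp - 16) 8
          (UInt64.toNat (u.reg Reg.r12))).writeLE (u.reg Reg.rsp - 24) 8 (UInt64.toNat (u.reg Reg.rbp))).writeLE
          (u.reg Reg.rsp - 32) 8 (UInt64.toNat (u.reg Reg.rbx))).writeLE (u.reg Reg.rsp - 48) 8 1085798).readLE (u.reg .rsp - 24) 8 = (u.reg .rbp).toNat := by
        u_read
      have h1' := Mem.readLE_frame (ν := s_109161r.mem) h0 (by u_eqon) (by u_omega)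
      rw [h1']
      exact UInt64.ofNat_toNat
    have hs4 : UInt64.ofNat (s_109161r.mem.readLE (u.reg .rsp - 32) 8) = u.reg .rbx := by
      have h0 : (((((u.mem.writeLE (u.reg Reg.rsp - 8) 8 (UInt64.toNat (u.reg Reg.r13))).writeLE (u.reg Reg.rsp - 16) 8
          (UInt64.toNat (u.reg Reg.r12))).writeLE (u.reg Reg.rsp - 24) 8 (UInt64.toNat (u.reg Reg.rbp))).writeLE
          (u.reg Reg.rsp - 32) 8 (UInt64.toNat (u.reg Reg.rbx))).writeLE (u.reg Reg.rsp - 48) 8 1085798).readLE (u.reg .rsp - 32) 8 = (u.reg .rbx).toNat := by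
        u_read
      have h1' := Mem.readLE_frame (ν := s_109161r.mem) h0 (by u_eqon) (by u_omega)
      rw [h1']
      exact UInt64.ofNat_toNat
    -- the shadow layer after `arena_poison(B + T, p − T)`: the released blocks leave the live list (`ArenaOK.shadow_temp_restore`)
    obtain ⟨hmem, hkeep⟩ := w_post
    rw [hrdi, hrsi] at hmem
    have hchain' : TempChain A.T dead p := by
      rw [← hp]
      exact hchain
    have hun1 : ShadowUntouched u.mem s_109161.mem := by v_untouched
    have hinv2 : ShadowInv (dropObjs (dead.map A.tempObj) others) frames ((u.reg .rsp).toNat + 8) s_109161r.mem := by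
      rw [hmem]
      exact hA.shadow_temp_restore (hsh.inv.untouched hun1) htemps hchain'
    -- `*f` is still live: THIS IS WHERE `hfree` IS NEEDED (no released block holds a byte of `*f`)
    have hobj2 : ObjLive (dropObjs (dead.map A.tempObj) others) frames (u.reg .rdi).toNat := by
      apply hpre.obj.drop
      intro o ho
      obtain ⟨b, hb, e⟩ := List.mem_map.mp ho
      have k1 := hchain'.mem hb
      have k2 := le_r8 b.2
      have eb : o.base = A.B + b.1 := by
        rw [← e]
        rfl
      have es : o.size = b.2 := by
        rw [← e]
        rfl
      simp only [voff]
      omega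
    clear hmem
    have hsame' : Mem.SameExcept [⟨(u.reg .rsp).toNat - 64, (u.reg .rsp).toNat⟩,
        ⟨0xC00000 + (A.B + A.T) / 8, 0xC00000 + (A.B + p + 7) / 8⟩] u.mem s_109161r.mem := by
      u_same
    u_walk hcode [hμ.vendor] span [Vorbis.L.textLo, Vorbis.L.textHi] side (v_side)
    · -- 10916dH (C 1013 `f->temp_offset = p`): check store4 `f + 132` IN THE NEW SHADOW: `*f` is still live (`hobj2`)
      have hun2 : ShadowUntouched s_109161r.mem s_10916d.mem := by v_untouched
      exact hobj2.accSmall hinv2 hun2 _ 4 (by decide) (by u_omega) (by u_omega)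
    · -- 109182H: the state after the `ret`: the contract's `Returned`
      refine ReachVia.done ?_
      v_returned
      · -- the post: `ArenaOK` for `T' = p`, `temps' = keep` (`ArenaOK.temp_restore` + AR5 from the store), and the shadow layer
        show ArenaOK (A.withTemp ((u.reg .rsi).toNat % 2 ^ 32) keep) (dropObjs (dead.map A.tempObj) others) s_109182.mem
            (u.reg .rdi).toNat ∧
          ShadowInv (dropObjs (dead.map A.tempObj) others) frames ((u.reg .rsp).toNat + 8) s_109182.mem
        rw [hp]
        have hun3 : ShadowUntouched s_109161r.mem s_109182.mem := by v_untouched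
        refine ⟨?_, hinv2.untouched hun3⟩
        apply hA.temp_restore htemps hchain'
        have hf : (u.reg .rdi).toNat + Off.sizeof.stb_vorbis ≤ 2 ^ 64 := by
          simp only [voff]
          omega
        apply hA.AR5.set_temp hf (A.withTemp p keep) rfl rfl rfl
        · -- `alloc_buffer`, the length, `setup_offset` read the same
          simp only [voff]
          rw [w_mem]
          u_eqon
        · -- `temp_offset` holds `p`
          simp only [vacc, voff, varena]
          have hread : s_109182.mem.readLE (u.reg .rdi + 132) 4 = p := by
            rw [w_mem, Mem.readLE_writeLE_same _ _ _ _ (by decide), Asan.part32_toNat]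
            omega
          have e : s_109182.mem.u32 ((u.reg .rdi).toNat + 132) = p := by
            rw [Mem.u32, ← hread]
            exact (readLE_field s_109182.mem (u.reg .rdi) 132 4).symm
          rw [Mem.i32_def, e]
          have := sint32_cases p
          omega
      · -- the footprint: the stack frame, `temp_offset`, the shadow of `[B + T, B + p)`
        simp only [X86.User.Spec.footprint, vspec, hp]
        unfold shadowSpan
        have e : A.B + A.T + (p - A.T) = A.B + p := by omega
        rw [e]
        u_same

end Vorbis.Spec.Worked.arena_temp_restore

/-- The unit: `calls_of_apart_w` with the last clause of the precondition as `hfree`. -/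
theorem Vorbis.Spec.Worked.arena_temp_restore_ok : Vorbis.Spec.arena_temp_restore.Statement := by
  intro Lay hLay μ hμ u₀ hcode hload8 hload4 hpoison hstore4 others frames A dead keep u ret he hpre
  exact Vorbis.Spec.Worked.arena_temp_restore.calls_of_apart_w Lay hLay μ hμ u₀ hcode hload8 hload4 hpoison hstore4 others frames A dead keep
    u ret he hpre hpre.2.2.2
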